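-- pv_equiv track=rewrite | github.com/apache/buildstream | buildstream2/_variables.py | _expand_expstr
-- ===== SOURCE A (Python) =====
-- def _expand_expstr(content, topvalue):
--     # Short-circuit constant strings
--     if topvalue[0] == 1:
--         return topvalue[1][0]
--
--     # Short-circuit strings which are entirely an expansion of another variable
--     # e.g. "%{another}"
--     if topvalue[0] == 2 and topvalue[1][0] == "":
--         return _expand_expstr(content, content[topvalue[1][1]])
--
--     # Otherwise process fully...
--     def internal_expand(value):
--         (expansion_len, expansion_bits) = value
--         idx = 0
--         while idx < expansion_len:
--             # First yield any constant string content
--             yield expansion_bits[idx]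
--             idx += 1
--             # Now, if there is an expansion variable left to expand, yield
--             # the expansion of that variable too
--             if idx < expansion_len:
--                 yield from internal_expand(content[expansion_bits[idx]])
--             idx += 1
--
--     return "".join(internal_expand(topvalue))
-- ===== SOURCE B (Python) =====
-- def _expand_expstr(content, topvalue):
--     # Iterative expansion: explicit work stack + output parts list, no recursion.
--     parts = []
--     stack = [topvalue]
--     while stack:
--         item = stack.pop()
--         if isinstance(item, str):
--             parts.append(item)
--             continue
--         (n, bits) = item
--         pending = []
--         idx = 0
--         while idx < n:
--             pending.append(bits[idx])
--             idx += 1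
--             if idx < n:
--                 pending.append(content[bits[idx]])
--             idx += 1
--         stack.extend(reversed(pending))
--     return "".join(parts)
-- ===== Notes on version B (the rewrite author's own statement) =====
-- stated objective: alternative
-- what changed: Replaces the recursive generator (and its two top-level short-circuit returns) with an iterative expansion: an explicit work stack of pending literals/templates and an output parts list, joined once at the end.
import Mathlib
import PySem

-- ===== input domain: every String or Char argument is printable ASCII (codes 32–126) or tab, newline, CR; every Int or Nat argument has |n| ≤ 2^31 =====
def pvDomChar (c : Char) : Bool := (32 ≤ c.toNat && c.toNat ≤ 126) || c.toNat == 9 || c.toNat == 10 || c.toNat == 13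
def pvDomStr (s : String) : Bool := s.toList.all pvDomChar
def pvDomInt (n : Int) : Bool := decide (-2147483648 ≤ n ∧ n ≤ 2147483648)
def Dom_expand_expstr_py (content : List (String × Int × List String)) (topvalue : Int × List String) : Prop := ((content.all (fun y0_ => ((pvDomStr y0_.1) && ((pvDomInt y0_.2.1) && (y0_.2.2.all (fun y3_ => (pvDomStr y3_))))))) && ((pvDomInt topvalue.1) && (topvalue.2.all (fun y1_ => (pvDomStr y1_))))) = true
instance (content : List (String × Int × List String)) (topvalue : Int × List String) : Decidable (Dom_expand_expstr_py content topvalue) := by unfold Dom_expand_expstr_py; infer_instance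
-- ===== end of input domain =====

-- B replaces A's recursive generator (and its two top-level short-circuits) by an explicit
-- work stack and an output parts list (alternative decomposition, same cost).

-- ===== PORT A =====
-- Python dict lookup content[name]: first matching key (none = KeyError).
def pyLookup (content : List (String × Int × List String)) (k : String) :
    Option (Int × List String) :=
  (content.find? (fun p => p.1 == k)).map (fun p => p.2)

-- the recursive generator internal_expand, flattened to the list of yielded strings;
-- the Nat argument is pure fuel (a totality guard for cyclic content, on which the Python
-- recurses forever; it is never exhausted under Pre_); the `.getD ""` after pyGet? and the
-- `none => []` after pyLookup are the IndexError/KeyError cases, excluded by Pre_.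
def internalA (content : List (String × Int × List String)) (f : Nat) (n : Int)
    (bits : List String) (idx : Int) : List String :=
  match f with
  | 0 => []
  | Nat.succ f' =>
    if _h : idx < n then
      (PySem.List.pyGet? bits idx).getD "" ::
      ((if idx + 1 < n then
          match pyLookup content ((PySem.List.pyGet? bits (idx + 1)).getD "") with
          | some v => internalA content f' v.1 v.2 0
          | none => []
        else []) ++ internalA content (Nat.succ f') n bits (idx + 2))
    else []
termination_by (f, (n - idx).toNat)
decreasing_by
  · exact Prod.Lex.left _ _ (Nat.lt_succ_self f')
  · exact Prod.Lex.right _ (by omega)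

-- the top-level function with its two short-circuits; fuel guards the short-circuit
-- recursion (never exhausted under Pre_).
def expandA (content : List (String × Int × List String)) :
    Nat → Int × List String → String
  | 0, _ => ""
  | Nat.succ f, (n, bits) =>
    if n = 1 then (PySem.List.pyGet? bits 0).getD ""
    else if n = 2 ∧ PySem.List.pyGet? bits 0 = some "" then
      match pyLookup content ((PySem.List.pyGet? bits 1).getD "") with
      | some v => expandA content f v
      | none => ""
    else PySem.Str.join "" (internalA content (Nat.succ f) n bits 0)

def expand_expstr_py (content : List (String × Int × List String))
    (topvalue : Int × List String) : String :=
  expandA content (content.length + 2) topvalue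

-- ===== PORT B =====
-- Source B's inner while loop building `pending`: literal bits become Sum.inl, looked-up
-- templates become Sum.inr (missing key = KeyError, excluded by Pre_).
def pendB (content : List (String × Int × List String)) (n : Int)
    (bits : List String) (idx : Int) : List (String ⊕ (Int × List String)) :=
  if _h : idx < n then
    Sum.inl ((PySem.List.pyGet? bits idx).getD "") ::
    ((if idx + 1 < n then
        match pyLookup content ((PySem.List.pyGet? bits (idx + 1)).getD "") with
        | some v => [Sum.inr v]
        | none => []
      else []) ++ pendB content n bits (idx + 2))
  else []
termination_by (n - idx).toNat

-- fuel bound for runB (totality guard only — Source B's while-loop is unbounded): an upper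
-- bound (exact under Pre_) on how many templates the loop will ever pop.
def cntB (content : List (String × Int × List String)) (f : Nat) (n : Int)
    (bits : List String) (idx : Int) : Nat :=
  match f with
  | 0 => 0
  | Nat.succ f' =>
    if _h : idx < n then
      (if idx + 1 < n then
         match pyLookup content ((PySem.List.pyGet? bits (idx + 1)).getD "") with
         | some v => 1 + cntB content f' v.1 v.2 0
         | none => 0
       else 0) + cntB content (Nat.succ f') n bits (idx + 2)
    else 0
termination_by (f, (n - idx).toNat)
decreasing_by
  · exact Prod.Lex.left _ _ (Nat.lt_succ_self f')
  · exact Prod.Lex.right _ (by omega)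

-- Source B's outer while loop: Python pops from the END of `stack` and extends with
-- reversed(pending); here the list HEAD is the stack top, so that is `pending ++ stack`.
-- Fuel ticks only on template pops (a totality guard for cyclic content, on which the
-- Python loops forever; never exhausted under Pre_).
def runB (content : List (String × Int × List String)) :
    Nat → List String → List (String ⊕ (Int × List String)) → List String
  | _, parts, [] => parts
  | f, parts, Sum.inl s :: stack => runB content f (parts ++ [s]) stack
  | 0, parts, Sum.inr _ :: _ => parts
  | Nat.succ f, parts, Sum.inr v :: stack =>
      runB content f parts (pendB content v.1 v.2 0 ++ stack)
termination_by f _ stack => (f, stack.length)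

def expand_expstr_py_alt (content : List (String × Int × List String))
    (topvalue : Int × List String) : String :=
  PySem.Str.join ""
    (runB content (1 + cntB content (content.length + 2) topvalue.1 topvalue.2 0)
      [] [Sum.inr topvalue])

-- ===== PRECONDITION & SPEC =====
-- template well-formedness: the loop bound never exceeds the bits list (no IndexError)
def wfT (v : Int × List String) : Bool :=
  decide (v.1 ≤ (v.2.length : Int)) || decide (v.1 ≤ 0)

-- the variable names a template references: its bits at odd positions below the bound
def refsOf (n : Int) (bits : List String) : List String :=
  ((List.range bits.length).filter (fun (j : Nat) => decide (j % 2 = 1) && decide ((j : Int) < n))).map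
    (fun j => bits.getD j "")

def tmplRefs (content : List (String × Int × List String)) (k : String) : List String :=
  match pyLookup content k with
  | some v => refsOf v.1 v.2
  | none => []

-- one step of reference-graph closure, and its iteration
def growR (content : List (String × Int × List String)) (S : Finset String) : Finset String :=
  S ∪ S.biUnion (fun k => (tmplRefs content k).toFinset)

def iterGrow (content : List (String × Int × List String)) :
    Nat → Finset String → Finset String
  | 0, S => S
  | Nat.succ k, S => iterGrow content k (growR content S)

-- Pre_ excludes exactly the inputs on which A raises: a template bound past its bits list
-- (IndexError), a reachable reference missing from content (KeyError), or a reachable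
-- reference cycle (unbounded recursion / RecursionError).
def Pre_expand_expstr_py (content : List (String × Int × List String))
    (topvalue : Int × List String) : Prop :=
  wfT topvalue = true ∧
  ∀ k ∈ iterGrow content (content.length + 1) (refsOf topvalue.1 topvalue.2).toFinset,
    (∃ v ∈ pyLookup content k, wfT v = true) ∧
    k ∉ iterGrow content (content.length + 1) (tmplRefs content k).toFinset

instance (content : List (String × Int × List String)) (topvalue : Int × List String) :
    Decidable (Pre_expand_expstr_py content topvalue) := by
  unfold Pre_expand_expstr_py; infer_instance

def pvWitness_expand_expstr_py : (List (String × Int × List String)) × (Int × List String) :=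
  ([("x", (4, ["-", "y", "-", "y"])), ("y", (1, ["hi"]))], (2, ["", "x"]))

def Spec_expand_expstr_py (content : List (String × Int × List String)) (topvalue : Int × List String) (out : String) : Prop := out = expand_expstr_py_alt content topvalue
instance (content : List (String × Int × List String)) (topvalue : Int × List String) (out : String) : Decidable (Spec_expand_expstr_py content topvalue out) := by unfold Spec_expand_expstr_py; infer_instance

-- ===== CLAIM (what is proved, stated in full; the proofs are below) =====
def Claim_equal_expand_expstr_py : Prop := ∀ (content : List (String × Int × List String)) (topvalue : Int × List String), Dom_expand_expstr_py content topvalue → Pre_expand_expstr_py content topvalue → Spec_expand_expstr_py content topvalue (expand_expstr_py content topvalue)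

-- ===== LEMMAS AND PROOFS =====

-- depth-indexed safety: the template is well-formed and every referenced variable exists
-- and is safe one level lower (Pre_'s acyclicity yields it at depth content.length + 2)
def SafeT (content : List (String × Int × List String)) :
    Nat → Int → List String → Prop
  | 0, _, _ => False
  | Nat.succ d, n, bits =>
      wfT (n, bits) = true ∧
      ∀ j : Nat, j % 2 = 1 → (j : Int) < n →
        ∃ v ∈ pyLookup content (bits.getD j ""), SafeT content d v.1 v.2

-- small-step equations for runB
theorem runB_nil (content : List (String × Int × List String)) (f : Nat)
    (parts : List String) : runB content f parts [] = parts := by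
  cases f <;> simp [runB]

theorem runB_inl (content : List (String × Int × List String)) (f : Nat)
    (parts : List String) (s : String) (stack : List (String ⊕ (Int × List String))) :
    runB content f parts (Sum.inl s :: stack) = runB content f (parts ++ [s]) stack := by
  cases f <;> simp [runB]

theorem runB_inr (content : List (String × Int × List String)) (f : Nat)
    (parts : List String) (v : Int × List String)
    (stack : List (String ⊕ (Int × List String))) :
    runB content (f + 1) parts (Sum.inr v :: stack) =
      runB content f parts (pendB content v.1 v.2 0 ++ stack) := by
  simp [runB]

theorem internalA_one (content : List (String × Int × List String)) (g : Nat)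
    (bits : List String) :
    internalA content (g + 1) 1 bits 0 = [(PySem.List.pyGet? bits 0).getD ""] := by
  rw [internalA]
  norm_num
  rw [internalA]
  norm_num

theorem join_one (s : String) : PySem.Str.join "" [s] = s := by
  simp [PySem.Str.join]

theorem chars_join_nil_cons (l : List (List Char)) :
    PySem.Chars.join [] ([] :: l) = PySem.Chars.join [] l := by
  cases l <;> simp [PySem.Chars.join, List.intercalate]

theorem join_empty_cons (l : List String) :
    PySem.Str.join "" ("" :: l) = PySem.Str.join "" l := by
  simp [PySem.Str.join, chars_join_nil_cons]

-- the stack machine consumes the pending list of a safe template exactly like A's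
-- generator: fuel decreases by the reference count, the flat expansion is appended
theorem main_pend (content : List (String × Int × List String)) :
    ∀ (d : Nat) (n : Int) (bits : List String), SafeT content (d + 1) n bits →
    ∀ (k : Nat) (idx : Int) (f : Nat) (parts : List String)
      (stack : List (String ⊕ (Int × List String))),
      0 ≤ idx → idx % 2 = 0 → (n - idx).toNat = k →
      runB content (cntB content (d + 1) n bits idx + f) parts
          (pendB content n bits idx ++ stack)
        = runB content f (parts ++ internalA content (d + 1) n bits idx) stack := by
  intro d
  induction d using Nat.strong_induction_on with
  | _ d IHd =>
    intro n bits hS k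
    induction k using Nat.strong_induction_on with
    | _ k IHk =>
      intro idx f parts stack h0 h2 hk
      by_cases hlt : idx < n
      · obtain ⟨hwf, Href⟩ := hS
        have hjlt : ((idx + 1).toNat : Int) = idx + 1 := by omega
        by_cases hlt2 : idx + 1 < n
        · obtain ⟨v, hv, hSv⟩ := Href (idx + 1).toNat (by omega) (by rw [hjlt]; exact hlt2)
          have hget : (PySem.List.pyGet? bits (idx + 1)).getD "" = bits.getD (idx + 1).toNat "" := by
            rw [PySem.List.pyGet?_of_nonneg bits (i := idx + 1) (by omega),
              List.getD_eq_getElem?_getD]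
          cases d with
          | zero => exact absurd hSv (by simp [SafeT])
          | succ d' =>
            have epend : pendB content n bits idx =
                Sum.inl ((PySem.List.pyGet? bits idx).getD "") ::
                  Sum.inr v :: pendB content n bits (idx + 2) := by
              rw [pendB, dif_pos hlt, if_pos hlt2, hget, hv]; rfl
            have eint : internalA content (d' + 1 + 1) n bits idx =
                (PySem.List.pyGet? bits idx).getD "" ::
                  (internalA content (d' + 1) v.1 v.2 0 ++
                    internalA content (d' + 1 + 1) n bits (idx + 2)) := by
              rw [internalA, dif_pos hlt, if_pos hlt2, hget, hv]
            have ecnt : cntB content (d' + 1 + 1) n bits idx =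
                (1 + cntB content (d' + 1) v.1 v.2 0) +
                  cntB content (d' + 1 + 1) n bits (idx + 2) := by
              rw [cntB, dif_pos hlt, if_pos hlt2, hget, hv]
            rw [epend, eint, ecnt]
            simp only [List.cons_append]
            rw [runB_inl]
            have efuel : (1 + cntB content (d' + 1) v.1 v.2 0) +
                cntB content (d' + 1 + 1) n bits (idx + 2) + f =
                (cntB content (d' + 1) v.1 v.2 0 +
                  (cntB content (d' + 1 + 1) n bits (idx + 2) + f)) + 1 := by omega
            rw [efuel, runB_inr]
            rw [IHd d' (Nat.lt_succ_self d') v.1 v.2 hSv (v.1 - 0).toNat 0 _ _ _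
              le_rfl rfl rfl]
            rw [IHk (n - (idx + 2)).toNat (by omega) (idx + 2) f _ stack (by omega)
              (by omega) rfl]
            simp
        · have epend : pendB content n bits idx =
              Sum.inl ((PySem.List.pyGet? bits idx).getD "") ::
                pendB content n bits (idx + 2) := by
            rw [pendB, dif_pos hlt, if_neg hlt2, List.nil_append]
          have eint : internalA content (d + 1) n bits idx =
              (PySem.List.pyGet? bits idx).getD "" ::
                internalA content (d + 1) n bits (idx + 2) := by
            rw [internalA, dif_pos hlt, if_neg hlt2, List.nil_append]
          have ecnt : cntB content (d + 1) n bits idx =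
              cntB content (d + 1) n bits (idx + 2) := by
            rw [cntB, dif_pos hlt, if_neg hlt2, Nat.zero_add]
          rw [epend, eint, ecnt]
          simp only [List.cons_append]
          rw [runB_inl,
            IHk (n - (idx + 2)).toNat (by omega) (idx + 2) f _ stack (by omega)
              (by omega) rfl]
          simp
      · rw [pendB, dif_neg hlt, internalA, dif_neg hlt, cntB, dif_neg hlt]
        simp

-- A's top-level short-circuits agree with the joined general expansion of a safe template
theorem expandA_eq (content : List (String × Int × List String)) :
    ∀ (g : Nat) (n : Int) (bits : List String), SafeT content g n bits →
      expandA content g (n, bits) = PySem.Str.join "" (internalA content g n bits 0) := by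
  intro g
  induction g with
  | zero => intro n bits hS; exact absurd hS (by simp [SafeT])
  | succ g IH =>
    intro n bits hS
    obtain ⟨hwf, Href⟩ := hS
    by_cases h1 : n = 1
    · subst h1
      show expandA content (Nat.succ g) (1, bits) = _
      simp only [expandA]
      rw [if_pos trivial, internalA_one, join_one]
    · by_cases h2 : n = 2 ∧ PySem.List.pyGet? bits 0 = some ""
      · obtain ⟨hn2, hb0⟩ := h2
        subst hn2
        have hlen2 : 2 ≤ bits.length := by
          simp only [wfT, Bool.or_eq_true, decide_eq_true_eq] at hwf
          rcases hwf with h | h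
          · exact_mod_cast h
          · omega
        obtain ⟨b0, b1, rest, rfl⟩ : ∃ b0 b1 t, bits = b0 :: b1 :: t := by
          cases bits with
          | nil => simp at hlen2
          | cons a t =>
            cases t with
            | nil => simp at hlen2
            | cons b t' => exact ⟨a, b, t', rfl⟩
        have hb0' : b0 = "" := by
          have := PySem.List.pyGet?_zero_cons b0 (b1 :: rest)
          rw [this] at hb0
          exact Option.some_inj.mp hb0
        subst hb0'
        obtain ⟨v, hv, hSv⟩ := Href 1 rfl (by norm_num)
        have hg1 : (PySem.List.pyGet? ("" :: b1 :: rest) 1).getD "" =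
            List.getD ("" :: b1 :: rest) (1 : Nat) "" := by
          rw [PySem.List.pyGet?_of_nonneg _ (i := 1) (by norm_num),
            List.getD_eq_getElem?_getD]
          rfl
        show expandA content (Nat.succ g) (2, "" :: b1 :: rest) = _
        simp only [expandA]
        rw [if_neg (by norm_num), if_pos ⟨trivial, hb0⟩, hg1]
        simp only [List.getD] at hv ⊢
        rw [hv]
        have etail : internalA content (Nat.succ g) 2 ("" :: b1 :: rest) 2 = [] := by
          rw [internalA, dif_neg (by norm_num)]
        have eint : internalA content (Nat.succ g) 2 ("" :: b1 :: rest) 0 =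
            "" :: (internalA content g v.1 v.2 0 ++
              internalA content (Nat.succ g) 2 ("" :: b1 :: rest) 2) := by
          rw [internalA, dif_pos (by norm_num), if_pos (by norm_num)]
          rw [show (0 : Int) + 1 = 1 from rfl, hg1]
          simp only [List.getD]
          rw [hv, hb0]
          norm_num
        rw [eint, etail, List.append_nil, join_empty_cons]
        exact IH v.1 v.2 hSv
      · show expandA content (Nat.succ g) (n, bits) = _
        simp only [expandA]
        rw [if_neg h1, if_neg h2]

-- iteration facts for the reference-graph closure
theorem subset_growR (content : List (String × Int × List String)) (S : Finset String) :
    S ⊆ growR content S :=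
  Finset.subset_union_left

theorem growR_mono (content : List (String × Int × List String))
    {S T : Finset String} (h : S ⊆ T) : growR content S ⊆ growR content T :=
  Finset.union_subset_union h (Finset.biUnion_subset_biUnion_of_subset_left _ h)

theorem subset_iterGrow (content : List (String × Int × List String)) :
    ∀ (k : Nat) (S : Finset String), S ⊆ iterGrow content k S := by
  intro k
  induction k with
  | zero => intro S; exact Finset.Subset.refl S
  | succ k IH =>
    intro S
    exact (subset_growR content S).trans (IH (growR content S))

theorem iterGrow_mono (content : List (String × Int × List String)) :
    ∀ (k : Nat) {S T : Finset String}, S ⊆ T → iterGrow content k S ⊆ iterGrow content k T := by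
  intro k
  induction k with
  | zero => intro S T h; exact h
  | succ k IH => intro S T h; exact IH (growR_mono content h)

theorem iterGrow_fix (content : List (String × Int × List String))
    {S : Finset String} (h : growR content S = S) :
    ∀ k, iterGrow content k S = S := by
  intro k
  induction k with
  | zero => rfl
  | succ k IH => show iterGrow content k (growR content S) = S; rw [h]; exact IH

theorem iterGrow_succ' (content : List (String × Int × List String)) :
    ∀ (k : Nat) (S : Finset String),
      iterGrow content (k + 1) S = growR content (iterGrow content k S) := by
  intro k
  induction k with
  | zero => intro S; rfl
  | succ k IH =>
    intro S
    show iterGrow content (k + 1) (growR content S) = _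
    rw [IH (growR content S)]
    rfl

-- keys of content, as a finite set
def keysF (content : List (String × Int × List String)) : Finset String :=
  (content.map Prod.fst).toFinset

theorem mem_keysF_of_lookup (content : List (String × Int × List String)) (k : String)
    (h : (pyLookup content k).isSome) : k ∈ keysF content := by
  unfold pyLookup at h
  rw [Option.isSome_map] at h
  rw [Option.isSome_iff_exists] at h
  obtain ⟨p, hp⟩ := h
  have hmem := List.mem_of_find?_eq_some hp
  have hkey := List.find?_some hp
  simp only [beq_iff_eq] at hkey
  unfold keysF
  rw [List.mem_toFinset]
  exact hkey ▸ List.mem_map_of_mem hmem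

-- pigeonhole: within content.length + 1 iterations the closure stabilizes, provided all
-- its elements are keys of content
theorem iter_closed (content : List (String × Int × List String)) (S : Finset String)
    (Hkeys : ∀ k ∈ iterGrow content (content.length + 1) S, (pyLookup content k).isSome) :
    growR content (iterGrow content (content.length + 1) S)
      = iterGrow content (content.length + 1) S := by
  set m := content.length with hm
  have hsubK : iterGrow content (m + 1) S ⊆ keysF content := by
    intro k hk; exact mem_keysF_of_lookup content k (Hkeys k hk)
  have hcardK : (keysF content).card ≤ m := by
    unfold keysF
    calc (content.map Prod.fst).toFinset.card ≤ (content.map Prod.fst).length :=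
          (content.map Prod.fst).toFinset_card_le
      _ = m := by rw [List.length_map]
  -- find a stabilization point i ≤ m
  by_cases hstab : ∃ i ≤ m, growR content (iterGrow content i S) = iterGrow content i S
  · obtain ⟨i, him, hfix⟩ := hstab
    have hall : ∀ j, iterGrow content (i + j) S = iterGrow content i S := by
      intro j
      induction j with
      | zero => rfl
      | succ j IH =>
        have : iterGrow content (i + j + 1) S = growR content (iterGrow content (i + j) S) :=
          iterGrow_succ' content (i + j) S
        rw [show i + (j + 1) = i + j + 1 from rfl, this, IH, hfix]
    have : iterGrow content (m + 1) S = iterGrow content i S := by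
      have := hall (m + 1 - i)
      rwa [show i + (m + 1 - i) = m + 1 by omega] at this
    rw [this, hfix]
  · exfalso
    push_neg at hstab
    have hgrow : ∀ i ≤ m, i + 1 ≤ (iterGrow content (i + 1) S).card := by
      intro i
      induction i with
      | zero =>
        intro _
        have hss : iterGrow content 0 S ⊂ iterGrow content (0 + 1) S := by
          rw [iterGrow_succ' content 0 S]
          exact (subset_growR content _).ssubset_of_ne (Ne.symm (hstab 0 (by omega)))
        have := Finset.card_lt_card hss
        omega
      | succ i IH =>
        intro hi
        have hss : iterGrow content (i + 1) S ⊂ iterGrow content (i + 1 + 1) S := by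
          rw [iterGrow_succ' content (i + 1) S]
          exact (subset_growR content _).ssubset_of_ne (Ne.symm (hstab (i + 1) hi))
        have h1 := Finset.card_lt_card hss
        have h2 := IH (by omega)
        omega
    have hfin : m + 1 ≤ (iterGrow content (m + 1) S).card := hgrow m le_rfl
    have := Finset.card_le_card hsubK
    omega

theorem mem_refsOf (n : Int) (bits : List String) (j : Nat)
    (hodd : j % 2 = 1) (hlt : (j : Int) < n) (hj : j < bits.length) :
    bits.getD j "" ∈ refsOf n bits := by
  unfold refsOf
  exact List.mem_map_of_mem
    (List.mem_filter.mpr ⟨List.mem_range.mpr hj, by simp [hodd, hlt]⟩)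

-- Pre_'s acyclic, fully-resolvable reference graph yields safety at depth
-- content.length + 2 (pigeonhole: reference chains cannot repeat a key)
theorem pre_safe (content : List (String × Int × List String)) (n : Int)
    (bits : List String) (hpre : Pre_expand_expstr_py content (n, bits)) :
    SafeT content (content.length + 2) n bits := by
  obtain ⟨hwf, HR⟩ := hpre
  set m := content.length with hm
  set R := iterGrow content (m + 1) (refsOf n bits).toFinset with hR
  have HkeysR : ∀ k ∈ R, (pyLookup content k).isSome := by
    intro k hk
    obtain ⟨⟨v, hv, _⟩, _⟩ := HR k hk
    rw [Option.mem_def] at hv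
    rw [hv]
    rfl
  have Rclosed : growR content R = R := iter_closed content _ HkeysR
  have hRfix : iterGrow content (m + 1) R = R := iterGrow_fix content Rclosed (m + 1)
  have hsubR : ∀ k ∈ R, iterGrow content (m + 1) (tmplRefs content k).toFinset ⊆ R := by
    intro k hk
    have h1 : (tmplRefs content k).toFinset ⊆ R := by
      intro x hx
      have hg : x ∈ growR content R :=
        Finset.mem_union_right _ (Finset.mem_biUnion.mpr ⟨k, hk, hx⟩)
      rwa [Rclosed] at hg
    exact (iterGrow_mono content (m + 1) h1).trans (le_of_eq hRfix)
  have Pclosed : ∀ k ∈ R,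
      growR content (iterGrow content (m + 1) (tmplRefs content k).toFinset)
        = iterGrow content (m + 1) (tmplRefs content k).toFinset := by
    intro k hk
    exact iter_closed content _ (fun x hx => HkeysR x (hsubR k hk hx))
  have SK : ∀ s : Nat, ∀ k, k ∈ R →
      (iterGrow content (m + 1) (tmplRefs content k).toFinset).card ≤ s →
      ∀ v, pyLookup content k = some v → SafeT content (s + 1) v.1 v.2 := by
    intro s
    induction s using Nat.strong_induction_on with
    | _ s IH =>
      intro k hkR hcard v hv
      obtain ⟨⟨v', hv', hwf'⟩, _⟩ := HR k hkR
      rw [Option.mem_def, hv, Option.some_inj] at hv'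
      subst hv'
      refine ⟨hwf', ?_⟩
      intro j hodd hjlt
      have hjlen : j < v.2.length := by
        simp only [wfT, Bool.or_eq_true, decide_eq_true_eq] at hwf'
        rcases hwf' with h | h <;> omega
      have hkmem : v.2.getD j "" ∈ tmplRefs content k := by
        unfold tmplRefs
        rw [hv]
        exact mem_refsOf v.1 v.2 j hodd hjlt hjlen
      have hk'P : v.2.getD j "" ∈ iterGrow content (m + 1) (tmplRefs content k).toFinset :=
        subset_iterGrow content (m + 1) _ (List.mem_toFinset.mpr hkmem)
      have hk'R : v.2.getD j "" ∈ R := hsubR k hkR hk'P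
      obtain ⟨v'', hv''⟩ := Option.isSome_iff_exists.mp (HkeysR _ hk'R)
      have hPsub : iterGrow content (m + 1) (tmplRefs content (v.2.getD j "")).toFinset
          ⊆ iterGrow content (m + 1) (tmplRefs content k).toFinset := by
        have h1 : (tmplRefs content (v.2.getD j "")).toFinset
            ⊆ iterGrow content (m + 1) (tmplRefs content k).toFinset := by
          intro x hx
          have hg : x ∈ growR content (iterGrow content (m + 1) (tmplRefs content k).toFinset) :=
            Finset.mem_union_right _ (Finset.mem_biUnion.mpr ⟨_, hk'P, hx⟩)
          rwa [Pclosed k hkR] at hg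
        exact (iterGrow_mono content (m + 1) h1).trans
          (le_of_eq (iterGrow_fix content (Pclosed k hkR) (m + 1)))
      have hk'notP := (HR _ hk'R).2
      have hssub : iterGrow content (m + 1) (tmplRefs content (v.2.getD j "")).toFinset
          ⊂ iterGrow content (m + 1) (tmplRefs content k).toFinset :=
        Finset.ssubset_iff_subset_ne.mpr ⟨hPsub, fun he => hk'notP (he ▸ hk'P)⟩
      have hclt := Finset.card_lt_card hssub
      have hs1 : 1 ≤ s := by omega
      have hS := IH (s - 1) (by omega) _ hk'R (by omega) v'' hv''
      rw [show s - 1 + 1 = s by omega] at hS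
      exact ⟨v'', Option.mem_def.mpr hv'', hS⟩
  refine ⟨hwf, ?_⟩
  intro j hodd hjlt
  have hjlen : j < bits.length := by
    simp only [wfT, Bool.or_eq_true, decide_eq_true_eq] at hwf
    rcases hwf with h | h <;> omega
  have hkR : bits.getD j "" ∈ R :=
    subset_iterGrow content (m + 1) _
      (List.mem_toFinset.mpr (mem_refsOf n bits j hodd hjlt hjlen))
  obtain ⟨v'', hv''⟩ := Option.isSome_iff_exists.mp (HkeysR _ hkR)
  have hRK : R ⊆ keysF content := fun x hx => mem_keysF_of_lookup content x (HkeysR x hx)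
  have hcardK : (keysF content).card ≤ m := by
    unfold keysF
    calc (content.map Prod.fst).toFinset.card ≤ (content.map Prod.fst).length :=
          (content.map Prod.fst).toFinset_card_le
      _ = m := by rw [List.length_map]
  have hcard : (iterGrow content (m + 1) (tmplRefs content (bits.getD j "")).toFinset).card
      ≤ m := by
    have h1 := Finset.card_le_card (hsubR _ hkR)
    have h2 := Finset.card_le_card hRK
    omega
  exact ⟨v'', Option.mem_def.mpr hv'', SK m _ hkR hcard v'' hv''⟩

-- ===== VERDICT (by name: the statement is the Claim_ definition above) =====
theorem expand_expstr_py_spec : Claim_equal_expand_expstr_py := by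
  intro content topvalue _hdom hpre
  obtain ⟨n, bits⟩ := topvalue
  have hS : SafeT content (content.length + 2) n bits := pre_safe content n bits hpre
  unfold Spec_expand_expstr_py expand_expstr_py expand_expstr_py_alt
  have hB : runB content (1 + cntB content (content.length + 2) n bits 0) [] [Sum.inr (n, bits)]
      = internalA content (content.length + 2) n bits 0 := by
    rw [show 1 + cntB content (content.length + 2) n bits 0
        = cntB content (content.length + 2) n bits 0 + 0 + 1 by omega]
    rw [runB_inr]
    simp only [List.append_nil]
    have h := main_pend content (content.length + 1) n bits hS (n - 0).toNat 0 0 [] []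
      le_rfl rfl rfl
    rw [runB_nil, List.nil_append, List.append_nil, Nat.add_zero] at h
    exact h
  simp only [hB]
  exact expandA_eq content (content.length + 2) n bits hS
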